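-- pv_equiv track=rewrite | github.com/sjstein/aoc2020 | day12/day12a.py | turndeg
-- ===== SOURCE A (Python) =====
-- def turndeg(cmd, loc):
--     dir = cmd[0]
--     dist = int(cmd[1:])
--     if dir == 'R':
--         loc[0] += dist
--     elif dir == 'L':
--         loc[0] -= dist
--     while loc[0] > 360:
--         loc[0] -= 360
--     while loc[0] < 0:
--         loc[0] += 360
--     return loc
-- ===== SOURCE B (Python) =====
-- def turndeg(cmd, loc):
--     turn = {'R': 1, 'L': -1}.get(cmd[0], 0)
--     loc[0] = (loc[0] + turn * int(cmd[1:])) % 360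
--     return loc
-- ===== Notes on version B (the rewrite author's own statement) =====
-- stated objective: idiomatic
-- what changed: The R/L branch plus the two normalization while-loops are replaced by a turn-sign table lookup and a single closed-form modulo reduction of the heading.
-- intended difference: On inputs whose resulting heading is a positive multiple of 360, A's strict '> 360' loop condition leaves the heading at 360 while B returns the canonical normalized heading 0, which is the intended value since 0 and 360 are the same direction and all other headings are reduced to [0,360). — e.g. on turndeg("R360", [0]): A returns [360], B returns [0]
import Mathlib
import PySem

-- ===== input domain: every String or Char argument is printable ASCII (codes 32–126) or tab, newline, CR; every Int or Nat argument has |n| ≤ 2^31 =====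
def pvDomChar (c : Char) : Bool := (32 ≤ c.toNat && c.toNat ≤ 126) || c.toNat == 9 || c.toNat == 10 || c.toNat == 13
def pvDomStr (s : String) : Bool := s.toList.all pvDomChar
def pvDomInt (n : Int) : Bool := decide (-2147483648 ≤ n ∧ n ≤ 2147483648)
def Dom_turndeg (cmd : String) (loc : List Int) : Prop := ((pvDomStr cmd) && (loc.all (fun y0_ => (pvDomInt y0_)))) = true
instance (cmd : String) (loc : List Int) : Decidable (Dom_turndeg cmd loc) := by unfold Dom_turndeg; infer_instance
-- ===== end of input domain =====

-- B replaces A's R/L branch and two normalization while-loops by a sign table and one modulo;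
-- on positive multiples of 360 A returns 360 where B returns 0 (stated as D_ below).
-- Both Pythons mutate loc[0] in place; the equivalence proved here is about the return value.

-- ===== PORT A =====
-- 'while loc[0] > 360: loc[0] -= 360'
def pvSubLoop (x : Int) : Int :=
  if 360 < x then pvSubLoop (x - 360) else x
termination_by x.toNat
decreasing_by omega

-- 'while loc[0] < 0: loc[0] += 360'
def pvAddLoop (x : Int) : Int :=
  if x < 0 then pvAddLoop (x + 360) else x
termination_by (-x).toNat
decreasing_by omega

def turndeg (cmd : String) (loc : List Int) : List Int :=
  match PySem.Str.pyGet? cmd 0, PySem.Int.ofStr? (PySem.Str.slice cmd (some 1) none), loc with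
  | some dir, some dist, x :: rest =>
      let x1 := if dir = 'R' then x + dist else if dir = 'L' then x - dist else x
      pvAddLoop (pvSubLoop x1) :: rest
  | _, _, _ => loc   -- unreachable under Pre_turndeg (Python raises here)

-- ===== PORT B =====
def turndeg_alt (cmd : String) (loc : List Int) : List Int :=
  match loc with
  | [] => loc   -- unreachable under Pre_turndeg (Python raises here)
  | x :: rest =>
    match PySem.Str.pyGet? cmd 0 with
    | none => loc   -- unreachable under Pre_turndeg
    | some d =>
      match PySem.Int.ofStr? (PySem.Str.slice cmd (some 1) none) with
      | none => loc   -- unreachable under Pre_turndeg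
      | some dist =>
        let turn := PySem.Dict.getD (PySem.Dict.ofList [('R', (1 : Int)), ('L', -1)]) d 0
        PySem.Int.mod (x + turn * dist) 360 :: rest

-- ===== PRECONDITION & SPEC =====
-- Pre_ excludes exactly the inputs where Python A raises: empty cmd (IndexError),
-- cmd[1:] not an int literal (ValueError), empty loc (IndexError).
def Pre_turndeg (cmd : String) (loc : List Int) : Prop :=
  (PySem.Str.pyGet? cmd 0).isSome ∧
  (PySem.Int.ofStr? (PySem.Str.slice cmd (some 1) none)).isSome ∧
  loc ≠ []
instance (cmd : String) (loc : List Int) : Decidable (Pre_turndeg cmd loc) := by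
  unfold Pre_turndeg; infer_instance
def pvWitness_turndeg : String × List Int := ("R90", [270, 5])

-- On inputs whose resulting heading is a positive multiple of 360, A's strict '> 360' loop
-- leaves 360 while B returns 0, the canonical normalized heading (intended, since every other
-- heading is reduced into [0,360) and 0 ≡ 360).
def D_turndeg (cmd : String) (loc : List Int) : Prop :=
  let c := cmd.toList.headD ' '
  let h := loc.headI + (if c = 'R' then 1 else if c = 'L' then -1 else 0)
      * (PySem.Int.ofStr? (PySem.Str.slice cmd (some 1) none)).getD 0
  0 < h ∧ 360 ∣ h
instance (cmd : String) (loc : List Int) : Decidable (D_turndeg cmd loc) := by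
  unfold D_turndeg; infer_instance

def Spec_turndeg (cmd : String) (loc : List Int) (out : List Int) : Prop :=
  ¬ D_turndeg cmd loc → out = turndeg_alt cmd loc
instance (cmd : String) (loc : List Int) (out : List Int) : Decidable (Spec_turndeg cmd loc out) := by unfold Spec_turndeg; infer_instance

def pvDiffWitness_turndeg : String × List Int := ("R360", [0])
def pvDiffWitnessOut_turndeg : (List Int) × (List Int) := ([360], [0])

-- ===== CLAIM =====
def Claim_unchanged_turndeg : Prop := ∀ (cmd : String) (loc : List Int), Dom_turndeg cmd loc → Pre_turndeg cmd loc → Spec_turndeg cmd loc (turndeg cmd loc)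
def Claim_changed_turndeg : Prop := Dom_turndeg (pvDiffWitness_turndeg.1) (pvDiffWitness_turndeg.2) ∧ Pre_turndeg (pvDiffWitness_turndeg.1) (pvDiffWitness_turndeg.2) ∧ D_turndeg (pvDiffWitness_turndeg.1) (pvDiffWitness_turndeg.2) ∧ turndeg (pvDiffWitness_turndeg.1) (pvDiffWitness_turndeg.2) = pvDiffWitnessOut_turndeg.1 ∧ turndeg_alt (pvDiffWitness_turndeg.1) (pvDiffWitness_turndeg.2) = pvDiffWitnessOut_turndeg.2 ∧ pvDiffWitnessOut_turndeg.1 ≠ pvDiffWitnessOut_turndeg.2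
def Claim_exact_turndeg : Prop := ∀ (cmd : String) (loc : List Int), Dom_turndeg cmd loc → Pre_turndeg cmd loc → D_turndeg cmd loc → turndeg cmd loc ≠ turndeg_alt cmd loc

-- ===== LEMMAS AND PROOFS =====
lemma pvSubLoop_eq (x : Int) :
    pvSubLoop x = if 360 < x then (if x % 360 = 0 then 360 else x % 360) else x := by
  induction x using pvSubLoop.induct with
  | case1 x h ih =>
      rw [pvSubLoop, if_pos h, ih]
      split_ifs <;> omega
  | case2 x h =>
      rw [pvSubLoop, if_neg h, if_neg h]

lemma pvAddLoop_eq (x : Int) :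
    pvAddLoop x = if x < 0 then x % 360 else x := by
  induction x using pvAddLoop.induct with
  | case1 x h ih =>
      rw [pvAddLoop, if_pos h, ih]
      split_ifs <;> omega
  | case2 x h =>
      rw [pvAddLoop, if_neg h, if_neg h]

lemma pvNorm_eq (x : Int) :
    pvAddLoop (pvSubLoop x) = if x % 360 = 0 ∧ 0 < x then 360 else x % 360 := by
  rw [pvSubLoop_eq]
  split_ifs <;> rw [pvAddLoop_eq] <;> split_ifs <;> omega

lemma pvTurn_eq (d : Char) :
    PySem.Dict.getD (PySem.Dict.ofList [('R', (1 : Int)), ('L', -1)]) d 0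
      = (if d = 'R' then 1 else if d = 'L' then -1 else 0) := by
  by_cases hR : d = 'R'
  · subst hR; decide
  · by_cases hL : d = 'L'
    · subst hL; decide
    · have hR' : ('R' == d) = false := by simp [hR, Ne.symm]
      have hL' : ('L' == d) = false := by simp [hL, Ne.symm]
      have hmk : PySem.Dict.ofList [('R', (1 : Int)), ('L', -1)]
          = PySem.Dict.mk [('R', 1), ('L', -1)] := by decide
      simp [PySem.Dict.getD, hmk, PySem.Dict.get?_mk_cons, hR', hL', hR, hL, PySem.Dict.get?]

lemma pvHeading_mul (x dist : Int) (d : Char) :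
    x + (if d = 'R' then (1:Int) else if d = 'L' then -1 else 0) * dist
      = (if d = 'R' then x + dist else if d = 'L' then x - dist else x) := by
  split_ifs <;> ring

lemma pvD_cons (cmd : String) (dir : Char) (dist x : Int) (rest : List Int)
    (hg : PySem.Str.pyGet? cmd 0 = some dir)
    (ho : PySem.Int.ofStr? (PySem.Str.slice cmd (some 1) none) = some dist) :
    D_turndeg cmd (x :: rest) ↔
      (0 < (if dir = 'R' then x + dist else if dir = 'L' then x - dist else x)
        ∧ (if dir = 'R' then x + dist else if dir = 'L' then x - dist else x) % 360 = 0) := by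
  have hg' : cmd.toList[0]? = some dir := by
    rw [show (0 : Int) = ((0 : Nat) : Int) from rfl, PySem.Str.pyGet?_natCast] at hg
    exact hg
  have hc : cmd.toList.headD ' ' = dir := by
    cases hl : cmd.toList with
    | nil => rw [hl] at hg'; simp at hg'
    | cons a t => rw [hl] at hg'; simp at hg'; simpa [hg']
  unfold D_turndeg
  rw [ho, hc]
  simp only [List.headI, Option.getD_some]
  rw [pvHeading_mul]
  constructor <;> rintro ⟨a, b⟩ <;> exact ⟨a, by omega⟩

-- ===== VERDICT =====
theorem turndeg_spec : Claim_unchanged_turndeg := by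
  intro cmd loc _ hpre hD
  obtain ⟨h1, h2, h3⟩ := hpre
  unfold turndeg turndeg_alt
  cases hg : PySem.Str.pyGet? cmd 0 with
  | none => simp_all
  | some dir =>
    cases ho : PySem.Int.ofStr? (PySem.Str.slice cmd (some 1) none) with
    | none => simp_all
    | some dist =>
      cases loc with
      | nil => exact absurd rfl h3
      | cons x rest =>
        simp only [List.cons.injEq, and_true]
        rw [pvTurn_eq, pvHeading_mul, pvNorm_eq]
        have hmod : PySem.Int.mod (if dir = 'R' then x + dist else if dir = 'L' then x - dist else x) 360
            = (if dir = 'R' then x + dist else if dir = 'L' then x - dist else x) % 360 :=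
          PySem.Int.mod_eq_emod_of_pos (by omega)
        have hP : ¬((if dir = 'R' then x + dist else if dir = 'L' then x - dist else x) % 360 = 0
            ∧ 0 < (if dir = 'R' then x + dist else if dir = 'L' then x - dist else x)) := by
          intro hc
          apply hD
          rw [pvD_cons cmd dir dist x rest hg ho]
          exact ⟨hc.2, hc.1⟩
        rw [hmod, if_neg hP]

theorem turndeg_changed : Claim_changed_turndeg := by
  unfold Claim_changed_turndeg
  have hg : PySem.Str.pyGet? "R360" 0 = some 'R' := by decide
  have ho : PySem.Int.ofStr? (PySem.Str.slice "R360" (some 1) none) = some (360 : Int) := by decide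
  refine ⟨by decide, by decide, by decide, ?_, ?_, by decide⟩
  · show turndeg "R360" [0] = [360]
    unfold turndeg
    rw [hg, ho]
    show pvAddLoop (pvSubLoop (if ('R' : Char) = 'R' then (0:Int) + 360 else if ('R':Char) = 'L' then 0 - 360 else 0)) :: [] = [360]
    rw [pvNorm_eq]
    norm_num
  · show turndeg_alt "R360" [0] = [0]
    unfold turndeg_alt
    rw [hg, ho]
    decide

theorem turndeg_tight : Claim_exact_turndeg := by
  intro cmd loc _ hpre hD
  obtain ⟨h1, h2, h3⟩ := hpre
  unfold turndeg turndeg_alt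
  cases hg : PySem.Str.pyGet? cmd 0 with
  | none => simp_all
  | some dir =>
    cases ho : PySem.Int.ofStr? (PySem.Str.slice cmd (some 1) none) with
    | none => simp_all
    | some dist =>
      cases loc with
      | nil => exact absurd rfl h3
      | cons x rest =>
        rw [pvD_cons cmd dir dist x rest hg ho] at hD
        obtain ⟨hp, hm⟩ := hD
        intro hhead
        injection hhead with hhead _
        rw [pvTurn_eq, pvHeading_mul, pvNorm_eq, if_pos ⟨hm, hp⟩] at hhead
        have hmod : PySem.Int.mod (if dir = 'R' then x + dist else if dir = 'L' then x - dist else x) 360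
            = (if dir = 'R' then x + dist else if dir = 'L' then x - dist else x) % 360 :=
          PySem.Int.mod_eq_emod_of_pos (by omega)
        rw [hmod, hm] at hhead
        omega
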